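-- pv_equiv track=rewrite | github.com/vivgxojo/Demos_Logique_de_prog_B13 | 5_log_sol.py | trier_logs
-- ===== SOURCE A (Python) =====
-- def trier_logs(logs):
--     infos = []
--     warnings = []
--     erreurs = []
--
--     for ligne in logs:
--         if ligne.startswith("[INFO]"):
--             infos.append(ligne)
--         elif ligne.startswith("[WARNING]"):
--             warnings.append(ligne)
--         elif ligne.startswith("[ERROR]"):
--             erreurs.append(ligne)
--
--     return infos, warnings, erreurs
-- ===== SOURCE B (Python) =====
-- def trier_logs(logs):
--     data = list(logs)
--     infos = [l for l in data if l.startswith("[INFO]")]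
--     warnings = [l for l in data if l.startswith("[WARNING]")]
--     erreurs = [l for l in data if l.startswith("[ERROR]")]
--     return infos, warnings, erreurs
-- ===== Notes on version B (the rewrite author's own statement) =====
-- stated objective: simpler
-- what changed: Replaced the single branching accumulating loop by three independent per-prefix filter passes (possible because the three prefixes are mutually exclusive, so per-bucket membership and order are preserved).
import Mathlib
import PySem

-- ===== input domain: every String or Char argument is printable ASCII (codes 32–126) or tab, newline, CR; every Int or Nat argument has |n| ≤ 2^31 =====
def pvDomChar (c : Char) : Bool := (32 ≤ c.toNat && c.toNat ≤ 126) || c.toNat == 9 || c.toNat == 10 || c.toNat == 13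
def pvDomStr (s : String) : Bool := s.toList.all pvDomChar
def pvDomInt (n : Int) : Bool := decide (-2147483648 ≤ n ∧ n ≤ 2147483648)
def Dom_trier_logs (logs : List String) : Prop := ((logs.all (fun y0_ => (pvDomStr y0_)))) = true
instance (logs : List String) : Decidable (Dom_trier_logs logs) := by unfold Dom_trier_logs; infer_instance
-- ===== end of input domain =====

-- B replaces A's single branching loop by three independent per-prefix filters; objective: simpler.

-- ===== PORT A =====
-- one pass: three accumulators, branch per line (transliteration of A's loop)
def trier_logs (logs : List String) : List String × List String × List String :=
  let st := logs.foldl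
    (fun (acc : List String × List String × List String) ligne =>
      if PySem.Str.startswith ligne "[INFO]" then (acc.1 ++ [ligne], acc.2.1, acc.2.2)
      else if PySem.Str.startswith ligne "[WARNING]" then (acc.1, acc.2.1 ++ [ligne], acc.2.2)
      else if PySem.Str.startswith ligne "[ERROR]" then (acc.1, acc.2.1, acc.2.2 ++ [ligne])
      else acc)
    ([], [], [])
  (st.1, st.2.1, st.2.2)

-- ===== PORT B =====
-- three independent filter passes (transliteration of Source B's comprehensions)
def trier_logs_alt (logs : List String) : List String × List String × List String :=
  let data := logs
  let infos := data.filter (fun l => PySem.Str.startswith l "[INFO]")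
  let warnings := data.filter (fun l => PySem.Str.startswith l "[WARNING]")
  let erreurs := data.filter (fun l => PySem.Str.startswith l "[ERROR]")
  (infos, warnings, erreurs)

-- ===== PRECONDITION & SPEC =====
def Spec_trier_logs (logs : List String) (out : List String × List String × List String) : Prop := out = trier_logs_alt logs
instance (logs : List String) (out : List String × List String × List String) : Decidable (Spec_trier_logs logs out) := by unfold Spec_trier_logs; infer_instance

-- ===== CLAIM (what is proved, stated in full; the proofs are below) =====
def Claim_equal_trier_logs : Prop := ∀ (logs : List String), Dom_trier_logs logs → Spec_trier_logs logs (trier_logs logs)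

-- ===== LEMMAS AND PROOFS =====

-- loop invariant: the fold from any accumulator state appends the three filters
theorem trier_logs_foldl (logs : List String) (a b c : List String) :
    logs.foldl
      (fun (acc : List String × List String × List String) ligne =>
        if PySem.Str.startswith ligne "[INFO]" then (acc.1 ++ [ligne], acc.2.1, acc.2.2)
        else if PySem.Str.startswith ligne "[WARNING]" then (acc.1, acc.2.1 ++ [ligne], acc.2.2)
        else if PySem.Str.startswith ligne "[ERROR]" then (acc.1, acc.2.1, acc.2.2 ++ [ligne])
        else acc)
      (a, b, c)
    = (a ++ logs.filter (fun l => PySem.Str.startswith l "[INFO]"),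
       b ++ logs.filter (fun l => PySem.Str.startswith l "[WARNING]"),
       c ++ logs.filter (fun l => PySem.Str.startswith l "[ERROR]")) := by
  induction logs generalizing a b c with
  | nil => simp
  | cons x xs ih =>
    simp only [List.foldl_cons, List.filter_cons]
    by_cases h1 : PySem.Str.startswith x "[INFO]" = true
    · -- "[WARNING]" and "[ERROR]" cannot also be prefixes of x
      have h2 : ¬ PySem.Str.startswith x "[WARNING]" = true := by
        rw [PySem.Str.startswith_eq, PySem.Chars.startswith_iff] at h1
        intro h
        rw [PySem.Str.startswith_eq, PySem.Chars.startswith_iff] at h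
        obtain ⟨t1, e1⟩ := h1
        obtain ⟨t2, e2⟩ := h
        have : ("[INFO]".toList ++ t1) = ("[WARNING]".toList ++ t2) := e1.trans e2.symm
        simp at this
      have h3 : ¬ PySem.Str.startswith x "[ERROR]" = true := by
        rw [PySem.Str.startswith_eq, PySem.Chars.startswith_iff] at h1
        intro h
        rw [PySem.Str.startswith_eq, PySem.Chars.startswith_iff] at h
        obtain ⟨t1, e1⟩ := h1
        obtain ⟨t2, e2⟩ := h
        have : ("[INFO]".toList ++ t1) = ("[ERROR]".toList ++ t2) := e1.trans e2.symm
        simp at this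
      rw [if_pos h1, ih, if_pos h1, if_neg h2, if_neg h3]
      simp
    · by_cases h2 : PySem.Str.startswith x "[WARNING]" = true
      · have h3 : ¬ PySem.Str.startswith x "[ERROR]" = true := by
          rw [PySem.Str.startswith_eq, PySem.Chars.startswith_iff] at h2
          intro h
          rw [PySem.Str.startswith_eq, PySem.Chars.startswith_iff] at h
          obtain ⟨t1, e1⟩ := h2
          obtain ⟨t2, e2⟩ := h
          have : ("[WARNING]".toList ++ t1) = ("[ERROR]".toList ++ t2) := e1.trans e2.symm
          simp at this
        rw [if_neg h1, if_pos h2, ih, if_neg h1, if_pos h2, if_neg h3]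
        simp
      · by_cases h3 : PySem.Str.startswith x "[ERROR]" = true
        · rw [if_neg h1, if_neg h2, if_pos h3, ih, if_neg h1, if_neg h2, if_pos h3]
          simp
        · rw [if_neg h1, if_neg h2, if_neg h3, ih, if_neg h1, if_neg h2, if_neg h3]

-- ===== VERDICT (by name: the statement is the Claim_ definition above) =====
theorem trier_logs_spec : Claim_equal_trier_logs := by
  intro logs _
  show trier_logs logs = trier_logs_alt logs
  unfold trier_logs trier_logs_alt
  rw [trier_logs_foldl]
  simp
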